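-- pv_equiv track=rewrite | github.com/shiridikumar/cp | inf3.py | max_magical_set_size
-- ===== SOURCE A (Python) =====
-- def max_magical_set_size(A, K):
--     N = len(A)
--     # Initialize good set
--     good_set = set()
--     for i in range(N):
--         # Add index i to good set if the condition is satisfied
--         for j in good_set:
--             if abs(i - j) < K:
--                 break
--         else:
--             good_set.add(i)
--     return len(good_set)
-- ===== SOURCE B (Python) =====
-- def max_magical_set_size(A, K):
--     # Closed form: the greedy over indices keeps exactly the multiples of K
--     # among 0..len(A)-1, i.e. ceil(len(A)/K); for K <= 0 every index is kept.
--     n = len(A)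
--     return n if K <= 0 else -(-n // K)
-- ===== Notes on version B (the rewrite author's own statement) =====
-- stated objective: faster
-- what changed: Replaces the quadratic greedy loop over a growing set of indices with a closed-form ceiling division ceil(len(A)/K) (len(A) when K<=0), since the greedy keeps exactly the multiples of K.
import Mathlib
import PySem

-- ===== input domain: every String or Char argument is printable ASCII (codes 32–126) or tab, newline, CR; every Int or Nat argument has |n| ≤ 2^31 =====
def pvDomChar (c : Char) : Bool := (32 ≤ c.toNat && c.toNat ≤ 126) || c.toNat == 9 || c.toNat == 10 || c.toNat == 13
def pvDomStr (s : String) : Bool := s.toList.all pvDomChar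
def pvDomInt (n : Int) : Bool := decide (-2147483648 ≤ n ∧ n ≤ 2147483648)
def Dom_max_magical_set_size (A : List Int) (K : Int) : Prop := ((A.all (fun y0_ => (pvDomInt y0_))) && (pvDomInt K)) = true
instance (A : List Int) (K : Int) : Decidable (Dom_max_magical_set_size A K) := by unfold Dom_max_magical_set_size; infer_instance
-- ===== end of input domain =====

-- B replaces A's quadratic greedy scan over a growing index set by the closed form
-- ceil(len(A)/K) (len(A) when K ≤ 0); a timing run measured B faster.

-- ===== PORT A =====
-- the loop body: add index i to the set unless some j already in it has |i - j| < K
def pvStepA (K : Int) (s : PySem.Set Int) (i : Nat) : PySem.Set Int :=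
  if s.any (fun j => |(i : Int) - j| < K) then s else PySem.Set.add s (i : Int)

def max_magical_set_size (A : List Int) (K : Int) : Int :=
  -- N = len(A); good_set built by the nested loop; return len(good_set)
  (((List.range A.length).foldl (pvStepA K) PySem.Set.empty).length : Int)

-- ===== PORT B =====
def max_magical_set_size_alt (A : List Int) (K : Int) : Int :=
  if K ≤ 0 then (A.length : Int)
  else -(PySem.Int.floordiv (-(A.length : Int)) K)

-- ===== PRECONDITION & SPEC =====
def Spec_max_magical_set_size (A : List Int) (K : Int) (out : Int) : Prop := out = max_magical_set_size_alt A K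
instance (A : List Int) (K : Int) (out : Int) : Decidable (Spec_max_magical_set_size A K out) := by unfold Spec_max_magical_set_size; infer_instance

-- ===== CLAIM (what is proved, stated in full; the proofs are below) =====
def Claim_equal_max_magical_set_size : Prop := ∀ (A : List Int) (K : Int), Dom_max_magical_set_size A K → Spec_max_magical_set_size A K (max_magical_set_size A K)

-- ===== LEMMAS AND PROOFS =====

-- K ≤ 0: the guard never fires, every index is added
lemma foldA_nonpos (K : Int) (hK : K ≤ 0) (N : Nat) :
    (List.range N).foldl (pvStepA K) PySem.Set.empty = (List.range N).map (fun (i : Nat) => (i : Int)) := by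
  induction N with
  | zero => rfl
  | succ n ih =>
    rw [List.range_succ, List.foldl_append, List.foldl_cons, List.foldl_nil, ih,
        List.map_append]
    have hany : (((List.range n).map (fun (i : Nat) => (i : Int)) : PySem.Set Int).any
        (fun j => decide (|(n : Int) - j| < K))) = false := by
      simp only [List.any_eq_false]
      intro j _
      simp only [decide_eq_true_eq, not_lt]
      exact le_trans hK (abs_nonneg _)
    have hnm : (n : Int) ∉ (List.range n).map (fun (i : Nat) => (i : Int)) := by
      simp only [List.mem_map, List.mem_range]
      rintro ⟨m, hm, he⟩
      omega
    simp only [pvStepA, hany, Bool.false_eq_true, if_false]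
    rw [PySem.Set.add_of_not_mem hnm]
    simp

-- 0 < K: the greedy set after the first N indices is exactly the multiples of K below N
lemma foldA_pos (K : Int) (hK : 0 < K) (N : Nat) :
    (List.range N).foldl (pvStepA K) PySem.Set.empty =
      ((List.range N).filter (fun (i : Nat) => decide ((i : Int) % K = 0))).map (fun (i : Nat) => (i : Int)) := by
  induction N with
  | zero => rfl
  | succ n ih =>
    rw [List.range_succ, List.foldl_append, List.foldl_cons, List.foldl_nil, ih]
    by_cases h : (n : Int) % K = 0
    · -- n is a multiple: no earlier multiple is within K, so n is added
      have hany : ((((List.range n).filter (fun (i : Nat) => decide ((i : Int) % K = 0))).map (fun (i : Nat) => (i : Int))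
            : PySem.Set Int).any (fun j => decide (|(n : Int) - j| < K))) = false := by
        simp only [List.any_eq_false]
        intro j hj
        simp only [List.mem_map, List.mem_filter, List.mem_range, decide_eq_true_eq] at hj ⊢
        obtain ⟨m, ⟨hmn, hmK⟩, rfl⟩ := hj
        have hdvd : K ∣ ((n : Int) - (m : Int)) :=
          dvd_sub (Int.dvd_of_emod_eq_zero h) (Int.dvd_of_emod_eq_zero hmK)
        have hpos : (0 : Int) < (n : Int) - (m : Int) := by
          have : (m : Int) < (n : Int) := by exact_mod_cast hmn
          omega
        have hge : K ≤ (n : Int) - (m : Int) := Int.le_of_dvd hpos hdvd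
        rw [abs_of_pos hpos]
        omega
      have hnm : (n : Int) ∉ ((List.range n).filter
          (fun (i : Nat) => decide ((i : Int) % K = 0))).map (fun (i : Nat) => (i : Int)) := by
        simp only [List.mem_map, List.mem_filter, List.mem_range]
        rintro ⟨m, ⟨hm, _⟩, he⟩
        omega
      rw [List.filter_append, List.map_append]
      simp only [pvStepA, hany, Bool.false_eq_true, if_false]
      rw [PySem.Set.add_of_not_mem hnm]
      have hfil : List.filter (fun (i : Nat) => decide ((i : Int) % K = 0)) [n] = [n] := by
        simpa using Int.dvd_of_emod_eq_zero h
      rw [hfil]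
      simp
    · -- n is not a multiple: the previous multiple K*(n/K) is closer than K
      have hr0 : 0 ≤ (n : Int) % K := Int.emod_nonneg _ (ne_of_gt hK)
      have hrK : (n : Int) % K < K := Int.emod_lt_of_pos _ hK
      have hdm : K * ((n : Int) / K) + (n : Int) % K = (n : Int) := Int.mul_ediv_add_emod _ _
      have hq0 : 0 ≤ (n : Int) / K := Int.ediv_nonneg (by positivity) (le_of_lt hK)
      set j : Int := K * ((n : Int) / K) with hjdef
      have hj0 : 0 ≤ j := mul_nonneg (le_of_lt hK) hq0
      have hjlt : j < (n : Int) := by omega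
      have hany : ((((List.range n).filter (fun (i : Nat) => decide ((i : Int) % K = 0))).map (fun (i : Nat) => (i : Int))
            : PySem.Set Int).any (fun j => decide (|(n : Int) - j| < K))) = true := by
        rw [List.any_eq_true]
        refine ⟨j, ?_, ?_⟩
        · simp only [List.mem_map, List.mem_filter, List.mem_range, decide_eq_true_eq]
          refine ⟨j.toNat, ⟨?_, ?_⟩, ?_⟩
          · omega
          · rw [Int.toNat_of_nonneg hj0, hjdef]
            exact Int.mul_emod_right _ _
          · simp [Int.toNat_of_nonneg hj0]
        · simp only [decide_eq_true_eq]
          have : (n : Int) - j = (n : Int) % K := by omega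
          rw [this, abs_of_nonneg hr0]
          exact hrK
      have hfil : List.filter (fun (i : Nat) => decide ((i : Int) % K = 0)) [n] = [] := by
        simpa using fun hd => h (Int.emod_eq_zero_of_dvd hd)
      rw [List.filter_append, hfil, List.append_nil]
      simp only [pvStepA, hany, if_true]

-- count of multiples of K below N brackets N between consecutive multiples
lemma count_bounds (K : Int) (hK : 0 < K) (N : Nat) :
    ((((List.range N).filter (fun (i : Nat) => decide ((i : Int) % K = 0))).length : Int) - 1) * K < (N : Int) ∧
    (N : Int) ≤ (((List.range N).filter (fun (i : Nat) => decide ((i : Int) % K = 0))).length : Int) * K := by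
  induction N with
  | zero => constructor <;> simp <;> nlinarith
  | succ n ih =>
    obtain ⟨ih1, ih2⟩ := ih
    rw [List.range_succ, List.filter_append]
    set c : Int := (((List.range n).filter (fun (i : Nat) => decide ((i : Int) % K = 0))).length : Int)
      with hc
    by_cases h : (n : Int) % K = 0
    · obtain ⟨t, ht⟩ := Int.dvd_of_emod_eq_zero h
      have htc : t = c := by
        have h1 : t ≤ c := le_of_mul_le_mul_left (by nlinarith) hK
        have h2 : c - 1 < t := lt_of_mul_lt_mul_left (by nlinarith) (le_of_lt hK)
        omega
      have hnc : (n : Int) = c * K := by rw [ht, htc]; ring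
      have hfil : List.filter (fun (i : Nat) => decide ((i : Int) % K = 0)) [n] = [n] := by
        simpa using Int.dvd_of_emod_eq_zero h
      rw [hfil, List.length_append, List.length_cons, List.length_nil]
      constructor <;> · push_cast; nlinarith
    · have hne : (n : Int) ≠ c * K := by
        intro he
        apply h
        rw [he]
        exact Int.mul_emod_left _ _
      have hlt : (n : Int) < c * K := lt_of_le_of_ne ih2 hne
      have hfil : List.filter (fun (i : Nat) => decide ((i : Int) % K = 0)) [n] = [] := by
        simpa using fun hd => h (Int.emod_eq_zero_of_dvd hd)
      rw [hfil, List.append_nil]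
      constructor
      · push_cast; linarith
      · push_cast; linarith
  
-- ===== VERDICT (by name: the statement is the Claim_ definition above) =====
theorem max_magical_set_size_spec : Claim_equal_max_magical_set_size := by
  intro A K _
  unfold Spec_max_magical_set_size max_magical_set_size max_magical_set_size_alt
  by_cases hK : K ≤ 0
  · rw [foldA_nonpos K hK, if_pos hK, List.length_map, List.length_range]
  · rw [not_le] at hK
    have hb := count_bounds K hK A.length
    rw [foldA_pos K hK, if_neg (not_le.mpr hK), List.length_map, eq_comm,
        PySem.Int.neg_floordiv_neg_eq_iff_of_pos hK]
    exact hb
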